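-- pv_equiv track=rewrite | github.com/yogesh1801/system-intelligence-benchmark | benchmarks/sysmobench/sysmobench_core/tla_eval/evaluation/semantics/manual_invariant_evaluator.py | _add_invariant_to_spec
-- ===== SOURCE A (Python) =====
-- def _add_invariant_to_spec(tla_content: str, invariant_definition: str, invariant_name: str) -> str:
--     """Add a single invariant definition to the TLA+ specification"""
--
--     lines = tla_content.split('\n')
--     result_lines = []
--
--     # Find the insertion point (before the closing ====)
--     invariant_inserted = False
--
--     # Find the last occurrence of a line starting with ====
--     last_separator_index = -1
--     for i in range(len(lines) - 1, -1, -1):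
--         if lines[i].strip().startswith('===='):
--             last_separator_index = i
--             break
--
--     for i, line in enumerate(lines):
--         # Insert before the module closing separator
--         if i == last_separator_index and last_separator_index != -1:
--             if not invariant_inserted:
--                 result_lines.append('')
--                 result_lines.append(f'\\* Manual invariant: {invariant_name}')
--                 result_lines.append(invariant_definition)
--                 result_lines.append('')
--                 invariant_inserted = True
--
--         result_lines.append(line)
--
--     # If no ==== found, append at the end
--     if not invariant_inserted:
--         result_lines.append('')
--         result_lines.append(f'\\* Manual invariant: {invariant_name}')
--         result_lines.append(invariant_definition)
--
--     return '\n'.join(result_lines)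
-- ===== SOURCE B (Python) =====
-- def _add_invariant_to_spec(tla_content: str, invariant_definition: str, invariant_name: str) -> str:
--     """Add a single invariant definition to the TLA+ specification"""
--     # One forward pass keeping two segments: 'pre' (lines strictly before the last
--     # separator seen so far) and 'post' (the segment starting at that separator),
--     # post is None while no separator has been seen.
--     pre, post = [], None
--     for line in tla_content.split('\n'):
--         if line.strip().startswith('===='):
--             if post is not None:
--                 pre += post
--             post = [line]
--         elif post is None:
--             pre.append(line)
--         else:
--             post.append(line)
--     block = ['', f'\\* Manual invariant: {invariant_name}', invariant_definition]
--     if post is None: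
--         return '\n'.join(pre + block)
--     return '\n'.join(pre + block + [''] + post)
-- ===== Notes on version B (the rewrite author's own statement) =====
-- stated objective: alternative
-- what changed: Replaces A's two passes (a backward index scan for the last '====' line, then an enumerate loop with an invariant_inserted flag) by one forward pass maintaining a two-segment accumulator (pre, post): each separator line flushes post into pre and restarts post, so at the end post is exactly the tail from the last separator and the block is spliced between the segments with no indices at all.
import Mathlib
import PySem

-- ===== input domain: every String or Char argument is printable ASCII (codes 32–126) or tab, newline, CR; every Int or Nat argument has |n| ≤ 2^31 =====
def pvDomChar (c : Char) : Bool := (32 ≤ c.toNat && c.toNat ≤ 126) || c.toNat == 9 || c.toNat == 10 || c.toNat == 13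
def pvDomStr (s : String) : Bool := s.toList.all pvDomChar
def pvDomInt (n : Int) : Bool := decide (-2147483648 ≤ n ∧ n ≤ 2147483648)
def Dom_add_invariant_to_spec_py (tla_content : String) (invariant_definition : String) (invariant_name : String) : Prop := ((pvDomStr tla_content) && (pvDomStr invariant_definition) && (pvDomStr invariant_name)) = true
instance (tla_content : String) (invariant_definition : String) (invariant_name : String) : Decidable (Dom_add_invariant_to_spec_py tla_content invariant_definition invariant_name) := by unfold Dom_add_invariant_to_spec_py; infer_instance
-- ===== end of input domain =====

-- B replaces A's backward index scan + flagged enumerate loop by one forward pass with a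
-- two-segment accumulator (pre, post); the block is spliced between the segments (objective: alternative).

-- shared predicate: line.strip().startswith('====')
def pvSepLine (l : String) : Bool :=
  PySem.Str.startswith (PySem.Str.strip l) "===="

-- ===== PORT A =====
-- backward scan 'for i in range(len(lines)-1,-1,-1): … break'
def pvFindSepA (lines : List String) : Nat → Int
  | 0 => -1
  | i + 1 => if pvSepLine (lines.getD i "") then (i : Int) else pvFindSepA lines i

-- loop body of A's 'for i, line in enumerate(lines)'
def pvStepA (idx : Int) (dfn nm : String) (st : List String × Bool) (p : Int × String) :
    List String × Bool :=
  let st :=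
    if p.1 = idx ∧ idx ≠ -1 then
      if st.2 = false then
        (st.1 ++ ["", "\\* Manual invariant: " ++ nm, dfn, ""], true)
      else st
    else st
  (st.1 ++ [p.2], st.2)

def add_invariant_to_spec_py (tla_content : String) (invariant_definition : String) (invariant_name : String) : String :=
  let lines := (PySem.Str.split? tla_content "\n").getD []  -- sep "\n" is non-empty, so split? is always some
  let last_separator_index := pvFindSepA lines lines.length
  let st := (PySem.List.enumerate lines 0).foldl
    (pvStepA last_separator_index invariant_definition invariant_name) ([], false)
  let result_lines :=
    if st.2 = false then
      st.1 ++ ["", "\\* Manual invariant: " ++ invariant_name, invariant_definition]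
    else st.1
  PySem.Str.join "\n" result_lines

-- ===== PORT B =====
-- B's loop body: separator line flushes post into pre and restarts post at this line
def pvStepB (st : List String × Option (List String)) (line : String) :
    List String × Option (List String) :=
  if pvSepLine line then (st.1 ++ st.2.getD [], some [line])
  else match st.2 with
    | none => (st.1 ++ [line], none)
    | some p => (st.1, some (p ++ [line]))

def add_invariant_to_spec_py_alt (tla_content : String) (invariant_definition : String) (invariant_name : String) : String :=
  let lines := (PySem.Str.split? tla_content "\n").getD []  -- sep "\n" is non-empty, so split? is always some
  let st := lines.foldl pvStepB ([], none)
  let block := ["", "\\* Manual invariant: " ++ invariant_name, invariant_definition]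
  match st.2 with
  | none => PySem.Str.join "\n" (st.1 ++ block)
  | some post => PySem.Str.join "\n" (st.1 ++ block ++ [""] ++ post)

-- ===== PRECONDITION & SPEC =====
def Spec_add_invariant_to_spec_py (tla_content : String) (invariant_definition : String) (invariant_name : String) (out : String) : Prop := out = add_invariant_to_spec_py_alt tla_content invariant_definition invariant_name
instance (tla_content : String) (invariant_definition : String) (invariant_name : String) (out : String) : Decidable (Spec_add_invariant_to_spec_py tla_content invariant_definition invariant_name out) := by unfold Spec_add_invariant_to_spec_py; infer_instance

-- ===== CLAIM (what is proved, stated in full; the proofs are below) =====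
def Claim_equal_add_invariant_to_spec_py : Prop := ∀ (tla_content : String) (invariant_definition : String) (invariant_name : String), Dom_add_invariant_to_spec_py tla_content invariant_definition invariant_name → Spec_add_invariant_to_spec_py tla_content invariant_definition invariant_name (add_invariant_to_spec_py tla_content invariant_definition invariant_name)

-- ===== LEMMAS AND PROOFS =====

-- once inserted (flag = true), A's loop only appends the remaining lines
theorem pvFoldTrue (idx : Int) (dfn nm : String) (xs : List String) (s : Int) (acc : List String) :
    (PySem.List.enumerate xs s).foldl (pvStepA idx dfn nm) (acc, true) = (acc ++ xs, true) := by
  induction xs generalizing s acc with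
  | nil => simp [PySem.List.enumerate_nil]
  | cons x xs ih =>
      simp only [PySem.List.enumerate_cons, List.foldl_cons, pvStepA]
      split_ifs <;> simp_all

-- with no separator (idx = -1), A's loop only appends the lines
theorem pvFoldNone (dfn nm : String) (xs : List String) (s : Int) (acc : List String) :
    (PySem.List.enumerate xs s).foldl (pvStepA (-1) dfn nm) (acc, false) = (acc ++ xs, false) := by
  induction xs generalizing s acc with
  | nil => simp [PySem.List.enumerate_nil]
  | cons x xs ih =>
      simp only [PySem.List.enumerate_cons, List.foldl_cons, pvStepA]
      simp [ih]

-- with a valid separator index s + k, A's loop splices the block before line k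
theorem pvFoldIns (dfn nm : String) (xs : List String) (k : Nat) (s : Int) (acc : List String)
    (hs : 0 ≤ s) (hk : k < xs.length) :
    (PySem.List.enumerate xs s).foldl (pvStepA (s + k) dfn nm) (acc, false) =
      (acc ++ xs.take k ++ ["", "\\* Manual invariant: " ++ nm, dfn, ""] ++ xs.drop k, true) := by
  induction xs generalizing s acc k with
  | nil => simp at hk
  | cons x xs ih =>
      cases k with
      | zero =>
          simp only [PySem.List.enumerate_cons, List.foldl_cons, pvStepA]
          have h1 : s = s + ((0 : Nat) : Int) ∧ s + ((0 : Nat) : Int) ≠ -1 := by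
            constructor <;> omega
          simp only [if_pos h1]
          simp [pvFoldTrue]
      | succ j =>
          simp only [PySem.List.enumerate_cons, List.foldl_cons, pvStepA]
          have h1 : ¬ (s = s + ((j + 1 : Nat) : Int) ∧ s + ((j + 1 : Nat) : Int) ≠ -1) := by
            push_cast; omega
          simp only [if_neg h1]
          have h2 : s + ((j + 1 : Nat) : Int) = (s + 1) + (j : Int) := by push_cast; ring
          rw [h2]
          have := ih j (s + 1) (acc ++ [x]) (by omega) (by simpa using hk)
          simp only [this]
          simp

-- A's backward break-scan = findIdx? on the reversed prefix
theorem pvFindSepA_eq (lines : List String) (k : Nat) (hk : k ≤ lines.length) :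
    pvFindSepA lines k =
      (match ((lines.take k).reverse.findIdx? pvSepLine) with
       | some j => (k : Int) - 1 - j
       | none => -1) := by
  induction k with
  | zero => simp [pvFindSepA]
  | succ k ih =>
      have hlt : k < lines.length := hk
      have htake : (lines.take (k + 1)).reverse = lines[k] :: (lines.take k).reverse := by
        rw [List.take_add_one]
        simp [List.getElem?_eq_getElem hlt]
      rw [pvFindSepA, htake, List.findIdx?_cons]
      have hget : lines.getD k "" = lines[k] := List.getD_eq_getElem lines "" hlt
      rw [hget]
      by_cases hp : pvSepLine lines[k] = true
      · simp [hp]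
      · simp only [Bool.not_eq_true] at hp
        simp only [hp, Bool.false_eq_true, if_false]
        rw [ih (by omega)]
        cases hfi : (lines.take k).reverse.findIdx? pvSepLine with
        | none => simp
        | some j =>
            simp only [Option.map_some]
            push_cast
            ring_nf

-- B's segment fold, characterized by the last separator position
theorem pvFoldB (xs : List String) :
    xs.foldl pvStepB ([], none) =
      (match xs.reverse.findIdx? pvSepLine with
       | none => (xs, none)
       | some j => (xs.take (xs.length - 1 - j), some (xs.drop (xs.length - 1 - j)))) := by
  induction xs using List.reverseRecOn with
  | nil => simp
  | append_singleton ys y ih =>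
      rw [List.foldl_append, List.foldl_cons, List.foldl_nil, ih]
      rw [List.reverse_append, List.reverse_singleton, List.singleton_append,
        List.findIdx?_cons]
      by_cases hy : pvSepLine y = true
      · -- y is a separator: it becomes the new post; everything before it is flushed to pre
        simp only [hy, if_pos]
        cases hfi : ys.reverse.findIdx? pvSepLine with
        | none =>
            simp [pvStepB, hy]
        | some j =>
            have hj : j < ys.length := by
              have := (List.findIdx?_eq_some_iff_getElem.mp hfi).1
              simpa using this
            simp only [pvStepB, hy, if_pos, Option.getD_some]
            have h1 : (ys ++ [y]).length - 1 - 0 = ys.length := by simp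
            rw [h1, List.take_left, List.drop_left, List.take_append_drop]
      · -- y is not a separator: it joins the current segment
        simp only [Bool.not_eq_true] at hy
        simp only [hy, Bool.false_eq_true, if_false]
        cases hfi : ys.reverse.findIdx? pvSepLine with
        | none => simp [pvStepB, hy]
        | some j =>
            have hj : j < ys.length := by
              have := (List.findIdx?_eq_some_iff_getElem.mp hfi).1
              simpa using this
            have hk : ys.length - 1 - j ≤ ys.length := by omega
            have hlen : (ys ++ [y]).length - 1 - (j + 1) = ys.length - 1 - j := by
              simp; omega
            simp only [pvStepB, hy, Bool.false_eq_true, if_false, Option.map_some, hlen]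
            rw [List.take_append_of_le_length hk, List.drop_append_of_le_length hk]

-- the whole equality
theorem pvMain (t d n : String) :
    add_invariant_to_spec_py t d n = add_invariant_to_spec_py_alt t d n := by
  simp only [add_invariant_to_spec_py, add_invariant_to_spec_py_alt]
  generalize (PySem.Str.split? t "\n").getD [] = L
  have hfind := pvFindSepA_eq L L.length (le_refl _)
  rw [List.take_length] at hfind
  rw [pvFoldB]
  cases hfi : L.reverse.findIdx? pvSepLine with
  | none =>
      rw [hfi] at hfind
      simp only at hfind
      rw [hfind, pvFoldNone]
      simp
  | some j =>
      have hj : j < L.length := by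
        have h2 := (List.findIdx?_eq_some_iff_getElem.mp hfi).1
        simpa using h2
      rw [hfi] at hfind
      simp only at hfind
      have hcast : (L.length : Int) - 1 - (j : Int) =
          ((0 : Int) + ((L.length - 1 - j : Nat) : Int)) := by
        push_cast [Nat.cast_sub (by omega : j ≤ L.length - 1),
          Nat.cast_sub (by omega : 1 ≤ L.length)]
        ring
      rw [hfind, hcast, pvFoldIns d n L (L.length - 1 - j) 0 [] (le_refl _) (by omega)]
      simp

-- ===== VERDICT (by name: the statement is the Claim_ definition above) =====
theorem add_invariant_to_spec_py_spec : Claim_equal_add_invariant_to_spec_py := by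
  intro t d n _
  exact pvMain t d n
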